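-- pv_equiv track=rewrite | github.com/NavierImage/Python_Practice | (구현)21611마법사상어와블리자드.py | pado2
-- ===== SOURCE A (Python) =====
-- def pado2(arr, idx_list):
--     temp = []
--     for num in range(len(idx_list)):
--         a, b = idx_list[num]
--         if arr[a][b] != 0:
--             temp.append(arr[a][b])
--             arr[a][b] = 0
--     for num in range(len(temp)):
--         a, b = idx_list[num]
--         arr[a][b] = temp[num]
--     return arr
-- ===== SOURCE B (Python) =====
-- def pado2(arr, idx_list):
--     w = 0
--     for a, b in idx_list:
--         v = arr[a][b]
--         if v != 0:
--             arr[a][b] = 0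
--             aa, bb = idx_list[w]
--             arr[aa][bb] = v
--             w += 1
--     return arr
-- ===== Notes on version B (the rewrite author's own statement) =====
-- stated objective: simpler
-- what changed: Replaces A's two phases (collect nonzero values into a temp list, then a second indexed loop rewriting them) by one in-place sweep with a write pointer: each nonzero cell is zeroed and immediately moved to the coordinate at the write pointer, no temp list and no second pass.
-- outside the precondition, e.g. on pado2([[0, 5]], [(0, 0), (0, 1), (0, 0)]): A returns [[5, 0]], B returns [[0, 5]]
import Mathlib
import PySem

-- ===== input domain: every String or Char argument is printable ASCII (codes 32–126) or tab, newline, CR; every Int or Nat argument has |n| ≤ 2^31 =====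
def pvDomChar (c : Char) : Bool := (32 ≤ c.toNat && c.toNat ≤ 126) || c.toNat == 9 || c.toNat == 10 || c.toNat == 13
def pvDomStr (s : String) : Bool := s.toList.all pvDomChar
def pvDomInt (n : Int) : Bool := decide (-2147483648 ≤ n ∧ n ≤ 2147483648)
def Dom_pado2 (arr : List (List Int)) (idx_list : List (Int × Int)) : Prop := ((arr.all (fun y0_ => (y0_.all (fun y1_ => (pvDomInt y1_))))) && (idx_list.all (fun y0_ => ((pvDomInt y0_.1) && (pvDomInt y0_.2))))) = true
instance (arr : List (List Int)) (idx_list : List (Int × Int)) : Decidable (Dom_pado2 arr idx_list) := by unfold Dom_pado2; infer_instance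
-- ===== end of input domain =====

-- B replaces A's two phases (collect nonzero values into a temp list, then rewrite them in a
-- second indexed loop) by a single in-place sweep with a write pointer; same return value.
-- Python A and B both mutate `arr` in place and return it: the equivalence proved here is about
-- the returned value (which is also the final state of `arr` for both).

-- ===== PORT A =====
-- arr[a][b] read (Python negative-index semantics; 0 when the index is out of range — excluded by Pre_)
def getC (g : List (List Int)) (p : Int × Int) : Int :=
  PySem.List.pyGetD (PySem.List.pyGetD g p.1 []) p.2 0

-- arr[a][b] = v  (Python negative-index semantics; no-op out of range — excluded by Pre_)
def setC (g : List (List Int)) (p : Int × Int) (v : Int) : List (List Int) :=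
  PySem.List.pySetD g p.1 (PySem.List.pySetD (PySem.List.pyGetD g p.1 []) p.2 v)

def pado2 (arr : List (List Int)) (idx_list : List (Int × Int)) : List (List Int) :=
  -- phase 1: collect nonzero values into temp, zeroing the cells
  let s := idx_list.foldl
    (fun (st : List (List Int) × List Int) p =>
      if getC st.1 p ≠ 0 then (setC st.1 p 0, st.2 ++ [getC st.1 p]) else st)
    (arr, ([] : List Int))
  -- phase 2: for num in range(len(temp)): arr[idx_list[num]] = temp[num]
  (PySem.List.pyRange 0 s.2.length 1).foldl
    (fun g num => setC g (PySem.List.pyGetD idx_list num ((0 : Int), (0 : Int))) (PySem.List.pyGetD s.2 num 0)) s.1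

-- ===== PORT B =====
def pado2_alt (arr : List (List Int)) (idx_list : List (Int × Int)) : List (List Int) :=
  (idx_list.foldl
    (fun (st : List (List Int) × Int) p =>
      let v := getC st.1 p
      if v ≠ 0 then
        (setC (setC st.1 p 0) (PySem.List.pyGetD idx_list st.2 ((0 : Int), (0 : Int))) v, st.2 + 1)
      else st)
    (arr, (0 : Int))).1

-- ===== PRECONDITION & SPEC =====
-- normalised (Python) index: the actual Nat position an in-range Int index denotes
abbrev toIdx (n : Nat) (i : Int) : Nat := if 0 ≤ i then i.toNat else n - (-i).toNat

-- coordinate p addresses an existing cell of g (Python negative indices allowed)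
abbrev inC (g : List (List Int)) (p : Int × Int) : Prop :=
  (-(g.length : Int) ≤ p.1 ∧ p.1 < g.length) ∧
  (-((g.getD (toIdx g.length p.1) []).length : Int) ≤ p.2 ∧
    p.2 < (g.getD (toIdx g.length p.1) []).length)

-- the cell (row, column) a coordinate denotes, normalised
abbrev keyC (g : List (List Int)) (p : Int × Int) : Nat × Nat :=
  (toIdx g.length p.1, toIdx (g.getD (toIdx g.length p.1) []).length p.2)

-- Pre_ excludes coordinates that are out of range (there A raises IndexError) and idx_lists that
-- address the same cell twice, where A's collect-then-rewrite double-writes cells in an order that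
-- is accidental (see cites).
def Pre_pado2 (arr : List (List Int)) (idx_list : List (Int × Int)) : Prop :=
  (∀ p ∈ idx_list, inC arr p) ∧ (idx_list.map (keyC arr)).Nodup

instance (arr : List (List Int)) (idx_list : List (Int × Int)) : Decidable (Pre_pado2 arr idx_list) := by
  unfold Pre_pado2; infer_instance

def pvWitness_pado2 : List (List Int) × (List (Int × Int)) :=
  ([[1, 0], [2]], [(0, 0), (0, 1), (1, 0)])

def Spec_pado2 (arr : List (List Int)) (idx_list : List (Int × Int)) (out : List (List Int)) : Prop := out = pado2_alt arr idx_list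
instance (arr : List (List Int)) (idx_list : List (Int × Int)) (out : List (List Int)) : Decidable (Spec_pado2 arr idx_list out) := by unfold Spec_pado2; infer_instance

-- ===== CLAIM (what is proved, stated in full; the proofs are below) =====
def Claim_equal_pado2 : Prop := ∀ (arr : List (List Int)) (idx_list : List (Int × Int)), Dom_pado2 arr idx_list → Pre_pado2 arr idx_list → Spec_pado2 arr idx_list (pado2 arr idx_list)

-- ===== LEMMAS AND PROOFS =====

lemma pyIdx?_eq {n : Nat} {i : Int} (h : -(n : Int) ≤ i ∧ i < n) :
    PySem.List.pyIdx? n i = some (toIdx n i) := by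
  unfold PySem.List.pyIdx? toIdx
  by_cases h0 : 0 ≤ i
  · rw [if_pos h0, if_pos h.2, if_pos h0]
  · rw [if_neg h0, if_pos h.1, if_neg h0]

lemma toIdx_lt {n : Nat} {i : Int} (h : -(n : Int) ≤ i ∧ i < n) : toIdx n i < n := by
  unfold toIdx; split_ifs <;> omega

lemma pyGetD_eq {xs : List Int} {i : Int} {d : Int} (h : -(xs.length : Int) ≤ i ∧ i < xs.length) :
    PySem.List.pyGetD xs i d = xs.getD (toIdx xs.length i) d := by
  unfold PySem.List.pyGetD PySem.List.pyGet?
  rw [pyIdx?_eq h]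
  simp [List.getD_eq_getElem?_getD]

lemma pyGetD_eq' {xs : List (List Int)} {i : Int} (h : -(xs.length : Int) ≤ i ∧ i < xs.length) :
    PySem.List.pyGetD xs i [] = xs.getD (toIdx xs.length i) [] := by
  unfold PySem.List.pyGetD PySem.List.pyGet?
  rw [pyIdx?_eq h]
  simp [List.getD_eq_getElem?_getD]

lemma pySetD_eq {α : Type} {xs : List α} {i : Int} {v : α} (h : -(xs.length : Int) ≤ i ∧ i < xs.length) :
    PySem.List.pySetD xs i v = xs.set (toIdx xs.length i) v := by
  unfold PySem.List.pySetD PySem.List.pySet?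
  rw [pyIdx?_eq h]
  rfl

-- nat-indexed cell read/write (proof-side view of getC/setC)
def gget (g : List (List Int)) (k : Nat × Nat) : Int := (g.getD k.1 []).getD k.2 0
def gset (g : List (List Int)) (k : Nat × Nat) (v : Int) : List (List Int) :=
  g.set k.1 ((g.getD k.1 []).set k.2 v)

lemma getC_eq {g : List (List Int)} {p : Int × Int} (h : inC g p) :
    getC g p = gget g (keyC g p) := by
  obtain ⟨h1, h2⟩ := h
  unfold getC gget
  rw [pyGetD_eq' h1, pyGetD_eq h2]

lemma setC_eq {g : List (List Int)} {p : Int × Int} (h : inC g p) (v : Int) :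
    setC g p v = gset g (keyC g p) v := by
  obtain ⟨h1, h2⟩ := h
  unfold setC gset
  rw [pyGetD_eq' h1, pySetD_eq h2, pySetD_eq h1]

lemma setC_cases (g : List (List Int)) (p : Int × Int) (v : Int) :
    setC g p v = (Option.map
      (fun k => g.set k (PySem.List.pySetD (PySem.List.pyGetD g p.1 []) p.2 v))
      (PySem.List.pyIdx? g.length p.1)).getD g := rfl

lemma length_setC (g : List (List Int)) (p : Int × Int) (v : Int) :
    (setC g p v).length = g.length := by
  rw [setC_cases]
  cases h : PySem.List.pyIdx? g.length p.1 <;> simp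

lemma getD_eq_getElem?_getD' {α : Type} (l : List α) (n : Nat) (d : α) :
    l.getD n d = l[n]?.getD d := List.getD_eq_getElem?_getD

lemma rowlen_setC (g : List (List Int)) (p : Int × Int) (v : Int) (r : Nat) :
    ((setC g p v).getD r []).length = (g.getD r []).length := by
  rw [setC_cases]
  cases h : PySem.List.pyIdx? g.length p.1 with
  | none => rfl
  | some k =>
    simp only [Option.map_some, Option.getD_some, getD_eq_getElem?_getD']
    rw [List.getElem?_set]
    split_ifs with h1 h2
    · subst h1
      simp only [Option.getD_some]
      rw [PySem.List.length_pySetD]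
      unfold PySem.List.pyGetD PySem.List.pyGet?
      rw [h]
      rfl
    · subst h1
      rw [List.getElem?_eq_none (by omega)]
    · rfl

lemma keyC_setC (g : List (List Int)) (q p : Int × Int) (w : Int) :
    keyC (setC g q w) p = keyC g p := by
  unfold keyC
  rw [length_setC, rowlen_setC]

lemma keyC_setC_funext (g : List (List Int)) (q : Int × Int) (w : Int) :
    keyC (setC g q w) = keyC g := funext fun p => keyC_setC g q p w

lemma inC_setC (g : List (List Int)) (q p : Int × Int) (w : Int) :
    inC (setC g q w) p ↔ inC g p := by
  unfold inC
  rw [length_setC, rowlen_setC]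

lemma gget_gset_ne {g : List (List Int)} {k k' : Nat × Nat} (hne : k' ≠ k) (v : Int) :
    gget (gset g k v) k' = gget g k' := by
  obtain ⟨a, c⟩ := k
  obtain ⟨a', c'⟩ := k'
  simp only [gget, gset, getD_eq_getElem?_getD']
  rw [List.getElem?_set]
  split_ifs with h1 h2
  · subst h1
    have hc : c' ≠ c := fun he => hne (by rw [he])
    simp only [Option.getD_some]
    rw [List.getElem?_set_ne (Ne.symm hc)]
  · subst h1
    rw [List.getElem?_eq_none (show g.length ≤ a by omega)]
  · rfl

lemma gset_comm {g : List (List Int)} {k k' : Nat × Nat} (hne : k ≠ k')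
    (h : k.1 < g.length) (v w : Int) :
    gset (gset g k v) k' w = gset (gset g k' w) k v := by
  obtain ⟨a, c⟩ := k
  obtain ⟨a', c'⟩ := k'
  simp only at h
  simp only [gset, getD_eq_getElem?_getD']
  by_cases ha : a = a'
  · subst ha
    have hc : c ≠ c' := fun he => hne (by rw [he])
    rw [List.getElem?_set, if_pos rfl, if_pos h, List.getElem?_set, if_pos rfl, if_pos h]
    simp only [Option.getD_some]
    rw [List.set_set, List.set_set, List.set_comm _ _ hc]
  · rw [List.getElem?_set, if_neg ha, List.getElem?_set, if_neg (Ne.symm ha),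
      List.set_comm _ _ ha]

-- combined cell-level lemmas on getC/setC
lemma getC_setC_ne {g : List (List Int)} {p q : Int × Int} (hp : inC g p) (hq : inC g q)
    (hk : keyC g p ≠ keyC g q) (v : Int) : getC (setC g q v) p = getC g p := by
  rw [getC_eq ((inC_setC g q p v).mpr hp), keyC_setC, setC_eq hq, getC_eq hp]
  exact gget_gset_ne hk v

lemma setC_setC_comm {g : List (List Int)} {p q : Int × Int} (hp : inC g p) (hq : inC g q)
    (hk : keyC g p ≠ keyC g q) (v w : Int) :
    setC (setC g q w) p v = setC (setC g p v) q w := by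
  have e1 : setC (setC g q w) p v = gset (gset g (keyC g q) w) (keyC g p) v := by
    rw [setC_eq ((inC_setC g q p w).mpr hp) v, keyC_setC, setC_eq hq w]
  have e2 : setC (setC g p v) q w = gset (gset g (keyC g p) v) (keyC g q) w := by
    rw [setC_eq ((inC_setC g p q v).mpr hq) w, keyC_setC, setC_eq hp v]
  rw [e1, e2]
  exact gset_comm (Ne.symm hk) (toIdx_lt hq.1) w v

-- A's phase 1 as a recursion
def phase1 (g : List (List Int)) : List (Int × Int) → List (List Int) × List Int
  | [] => (g, [])
  | p :: R =>
    if getC g p ≠ 0 then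
      let t := phase1 (setC g p 0) R
      (t.1, getC g p :: t.2)
    else phase1 g R

-- A's phase 2 as a recursion consuming coordinates and values in lockstep
def writeAll (g : List (List Int)) : List (Int × Int) → List Int → List (List Int)
  | q :: W, v :: T => writeAll (setC g q v) W T
  | _, _ => g

-- B's sweep as a recursion on the remaining reads and the remaining write targets
def bpass (g : List (List Int)) : List (Int × Int) → List (Int × Int) → List (List Int)
  | p :: R, W =>
    if getC g p ≠ 0 then
      match W with
      | q :: W' => bpass (setC (setC g p 0) q (getC g p)) R W'
      | [] => g
    else bpass g R W
  | [], _ => g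

lemma phase1_len (R : List (Int × Int)) : ∀ g, (phase1 g R).2.length ≤ R.length := by
  induction R with
  | nil => intro g; simp [phase1]
  | cons p R ih =>
    intro g
    by_cases h : getC g p = 0
    · simp only [phase1, h, ne_eq, not_true_eq_false, ite_false, List.length_cons]
      exact Nat.le_succ_of_le (ih g)
    · simp only [phase1, h, ne_eq, not_false_eq_true, ite_true, List.length_cons]
      exact Nat.succ_le_succ (ih (setC g p 0))

lemma phase1_comm (R : List (Int × Int)) : ∀ (g : List (List Int)) (q : Int × Int) (v : Int),
    inC g q → (∀ p ∈ R, inC g p) → (∀ p ∈ R, keyC g p ≠ keyC g q) →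
    phase1 (setC g q v) R = (setC (phase1 g R).1 q v, (phase1 g R).2) := by
  induction R with
  | nil => intro g q v _ _ _; simp [phase1]
  | cons p R ih =>
    intro g q v hq hin hkey
    have hp : inC g p := hin p (by simp)
    have hkpq : keyC g p ≠ keyC g q := hkey p (by simp)
    have hread : getC (setC g q v) p = getC g p := getC_setC_ne hp hq hkpq v
    by_cases h0 : getC g p = 0
    · simp only [phase1, hread, h0, ne_eq, not_true_eq_false, ite_false]
      exact ih g q v hq (fun x hx => hin x (by simp [hx])) (fun x hx => hkey x (by simp [hx]))
    · simp only [phase1, hread, h0, ne_eq, not_false_eq_true, ite_true]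
      have hswap : setC (setC g q v) p 0 = setC (setC g p 0) q v :=
        setC_setC_comm hp hq hkpq 0 v
      rw [hswap]
      have ih' := ih (setC g p 0) q v ((inC_setC g p q 0).mpr hq)
        (fun x hx => (inC_setC g p x 0).mpr (hin x (by simp [hx])))
        (fun x hx => by rw [keyC_setC, keyC_setC]; exact hkey x (by simp [hx]))
      rw [ih']

lemma main_lemma (R : List (Int × Int)) : ∀ (M : List (Int × Int)) (g : List (List Int)),
    (∀ p ∈ M ++ R, inC g p) → ((M ++ R).map (keyC g)).Nodup →
    writeAll (phase1 g R).1 (M ++ R) (phase1 g R).2 = bpass g R (M ++ R) := by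
  induction R with
  | nil =>
    intro M g _ _
    simp only [phase1, bpass]
    cases M <;> rfl
  | cons p R ih =>
    intro M g hin hnd
    have hp : inC g p := hin p (by simp)
    by_cases h0 : getC g p = 0
    · simp only [phase1, bpass, h0, ne_eq, not_true_eq_false, ite_false]
      have := ih (M ++ [p]) g (by simpa using hin) (by simpa using hnd)
      simpa using this
    · simp only [phase1, bpass, h0, ne_eq, not_false_eq_true, ite_true]
      cases M with
      | nil =>
        -- write target is p itself
        have hnd0 : (keyC g p :: R.map (keyC g)).Nodup := hnd
        have hkeys : ∀ x ∈ R, keyC g x ≠ keyC g p := by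
          intro x hx he
          exact (List.nodup_cons.mp hnd0).1 (List.mem_map.mpr ⟨x, hx, he⟩)
        have hnd' : (R.map (keyC g)).Nodup := (List.nodup_cons.mp hnd0).2
        have hcomm := phase1_comm R (setC g p 0) p (getC g p)
          ((inC_setC g p p 0).mpr hp)
          (fun x hx => (inC_setC g p x 0).mpr (hin x (by simp [hx])))
          (fun x hx => by rw [keyC_setC, keyC_setC]; exact hkeys x hx)
        have hc1 : (phase1 (setC (setC g p 0) p (getC g p)) R).1
            = setC (phase1 (setC g p 0) R).1 p (getC g p) := by rw [hcomm]
        have hc2 : (phase1 (setC (setC g p 0) p (getC g p)) R).2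
            = (phase1 (setC g p 0) R).2 := by rw [hcomm]
        simp only [List.nil_append, writeAll]
        rw [← hc1, ← hc2]
        have := ih [] (setC (setC g p 0) p (getC g p))
          (fun x hx => (inC_setC _ p x _).mpr ((inC_setC g p x 0).mpr
            (hin x (by simp at hx; simp [hx]))))
          (by simpa [keyC_setC_funext] using hnd')
        simpa using this
      | cons m M0 =>
        have hm : inC g m := hin m (by simp)
        have hnd0 : (keyC g m :: (M0 ++ p :: R).map (keyC g)).Nodup := hnd
        have hkeys : ∀ x ∈ R, keyC g x ≠ keyC g m := by
          intro x hx he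
          exact (List.nodup_cons.mp hnd0).1
            (List.mem_map.mpr ⟨x, by simp [hx], he⟩)
        have hnd' : ((M0 ++ p :: R).map (keyC g)).Nodup := (List.nodup_cons.mp hnd0).2
        have hcomm := phase1_comm R (setC g p 0) m (getC g p)
          ((inC_setC g p m 0).mpr hm)
          (fun x hx => (inC_setC g p x 0).mpr (hin x (by simp [hx])))
          (fun x hx => by rw [keyC_setC, keyC_setC]; exact hkeys x hx)
        have hc1 : (phase1 (setC (setC g p 0) m (getC g p)) R).1
            = setC (phase1 (setC g p 0) R).1 m (getC g p) := by rw [hcomm]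
        have hc2 : (phase1 (setC (setC g p 0) m (getC g p)) R).2
            = (phase1 (setC g p 0) R).2 := by rw [hcomm]
        simp only [List.cons_append, writeAll]
        rw [← hc1, ← hc2]
        have := ih (M0 ++ [p]) (setC (setC g p 0) m (getC g p))
          (fun x hx => (inC_setC _ m x _).mpr ((inC_setC g p x 0).mpr
            (hin x (by revert hx; simp; tauto))))
          (by simpa [keyC_setC_funext, List.append_assoc] using hnd')
        simpa using this

-- fold bridges
lemma foldA (R : List (Int × Int)) : ∀ (g : List (List Int)) (acc : List Int),
    R.foldl (fun (st : List (List Int) × List Int) p =>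
      if getC st.1 p ≠ 0 then (setC st.1 p 0, st.2 ++ [getC st.1 p]) else st) (g, acc)
    = ((phase1 g R).1, acc ++ (phase1 g R).2) := by
  induction R with
  | nil => intro g acc; simp [phase1]
  | cons p R ih =>
    intro g acc
    by_cases h : getC g p = 0
    · simp only [List.foldl_cons, phase1, h, ne_eq, not_true_eq_false, ite_false]
      exact ih g acc
    · simp only [List.foldl_cons, phase1, h, ne_eq, not_false_eq_true, ite_true]
      rw [ih (setC g p 0) (acc ++ [getC g p])]
      simp

lemma pyRange0 (n : Nat) : PySem.List.pyRange 0 (n : Int) 1 = (List.range n).map Nat.cast := by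
  unfold PySem.List.pyRange
  split_ifs with h1 h2 h3
  · exact absurd h1 (by norm_num)
  · have hc : ((((n : Int)) - 0 + 1 - 1) / 1).toNat = n := by
      have : ((n : Int)) - 0 + 1 - 1 = (n : Int) := by ring
      rw [this, Int.ediv_one, Int.toNat_natCast]
    rw [hc]
    exact List.map_congr_left (fun k _ => by ring)
  · have hn : n = 0 := by omega
    subst hn
    rfl
  · exact absurd (by norm_num : (0:Int) < 1) h2
  · exact absurd (by norm_num : (0:Int) < 1) h2

lemma writeAll_snoc (T : List Int) : ∀ (L : List (Int × Int)) (g : List (List Int)) (v : Int),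
    T.length < L.length →
    writeAll g L (T ++ [v]) = setC (writeAll g L T) (L.getD T.length ((0:Int), (0:Int))) v := by
  induction T with
  | nil =>
    intro L g v h
    cases L with
    | nil => simp at h
    | cons q L' => simp [writeAll]
  | cons t T' ih =>
    intro L g v h
    cases L with
    | nil => simp at h
    | cons q L' =>
      simp only [List.cons_append, writeAll, List.length_cons, List.getD_cons_succ]
      exact ih L' (setC g q t) v (by simpa using h)

lemma phase2_bridge (T : List Int) (L : List (Int × Int)) (g : List (List Int))
    (h : T.length ≤ L.length) :
    (List.range T.length).foldl
      (fun g num => setC g (L.getD num ((0:Int), (0:Int))) (T.getD num 0)) g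
    = writeAll g L T := by
  induction T using List.reverseRecOn with
  | nil => cases L <;> rfl
  | append_singleton T' v ih =>
    have hlt : T'.length < L.length := by simpa using h
    rw [List.length_append, List.length_singleton, List.range_succ, List.foldl_append]
    simp only [List.foldl_cons, List.foldl_nil]
    have hcong : (List.range T'.length).foldl
        (fun g num => setC g (L.getD num ((0:Int), (0:Int))) ((T' ++ [v]).getD num 0)) g
      = (List.range T'.length).foldl
        (fun g num => setC g (L.getD num ((0:Int), (0:Int))) (T'.getD num 0)) g := by
      apply PySem.List.foldl_congr_mem
      intro acc num hnum
      have : num < T'.length := List.mem_range.mp hnum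
      rw [getD_eq_getElem?_getD' (T' ++ [v]), List.getElem?_append_left this,
        ← getD_eq_getElem?_getD']
    rw [hcong, ih (Nat.le_of_lt hlt), writeAll_snoc T' L g v hlt]
    congr 1
    rw [getD_eq_getElem?_getD' (T' ++ [v]), List.getElem?_append_right (le_refl _)]
    simp

lemma foldB (L : List (Int × Int)) (R : List (Int × Int)) : ∀ (g : List (List Int)) (wn k : Nat),
    L.drop (wn + k) = R →
    (R.foldl (fun (st : List (List Int) × Int) p =>
      let v := getC st.1 p
      if v ≠ 0 then
        (setC (setC st.1 p 0) (PySem.List.pyGetD L st.2 ((0:Int), (0:Int))) v, st.2 + 1)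
      else st) (g, (wn : Int))).1
    = bpass g R (L.drop wn) := by
  induction R with
  | nil => intro g wn k _; simp [bpass]
  | cons p R' ih =>
    intro g wn k hdrop
    have hlen : wn + k < L.length := by
      by_contra hc
      rw [List.drop_eq_nil_of_le (by omega)] at hdrop
      exact (List.cons_ne_nil p R') hdrop.symm
    have hwn : wn < L.length := by omega
    have hdrop' : L.drop (wn + k + 1) = R' := by
      have := congrArg List.tail hdrop
      simpa [List.tail_drop] using this
    by_cases h0 : getC g p = 0
    · simp only [List.foldl_cons, h0, ne_eq, not_true_eq_false, ite_false]
      rw [show wn + k + 1 = wn + (k + 1) by omega] at hdrop'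
      have := ih g wn (k + 1) hdrop'
      simp only [bpass, h0, ne_eq, not_true_eq_false, ite_false]
      exact this
    · simp only [List.foldl_cons, h0, ne_eq, not_false_eq_true, ite_true]
      have hget : PySem.List.pyGetD L (wn : Int) ((0:Int), (0:Int)) = L.getD wn ((0:Int), (0:Int)) := by
        simp [PySem.List.pyGetD_natCast]
      have hdropwn : L.drop wn = L.getD wn ((0:Int),(0:Int)) :: L.drop (wn + 1) := by
        rw [List.drop_eq_getElem_cons hwn, List.getD_eq_getElem?_getD, List.getElem?_eq_getElem hwn]
        rfl
      rw [hget]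
      have hcast : ((wn : Int) + 1) = ((wn + 1 : Nat) : Int) := by push_cast; ring
      rw [hcast]
      have := ih (setC (setC g p 0) (L.getD wn ((0:Int),(0:Int))) (getC g p)) (wn + 1) k
        (by rw [show wn + 1 + k = wn + k + 1 by omega]; exact hdrop')
      rw [this, hdropwn]
      simp [bpass, h0]

-- ===== VERDICT (by name: the statement is the Claim_ definition above) =====
theorem pado2_spec : Claim_equal_pado2 := by
  intro arr L _hdom hpre
  obtain ⟨hin, hnd⟩ := hpre
  unfold Spec_pado2 pado2 pado2_alt
  rw [foldA L arr []]
  simp only [List.nil_append]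
  rw [pyRange0, List.foldl_map]
  have hsimp : (fun (g : List (List Int)) (num : Nat) =>
      setC g (PySem.List.pyGetD L (num : Int) ((0:Int), (0:Int))) (PySem.List.pyGetD (phase1 arr L).2 (num : Int) 0))
    = fun g num => setC g (L.getD num ((0:Int), (0:Int))) ((phase1 arr L).2.getD num 0) := by
    funext g num
    simp [PySem.List.pyGetD_natCast]
  rw [hsimp, phase2_bridge _ L _ (phase1_len L arr)]
  have hB := foldB L L arr 0 0 (by simp)
  simp only [Nat.cast_zero, List.drop_zero] at hB
  rw [hB]
  have := main_lemma L [] arr (by simpa using hin) (by simpa using hnd)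
  simpa using this
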